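-- pv_equiv track=rewrite | github.com/amahdi4/ActionFlow | src/actionflow/cli.py | _limit_per_class
-- ===== SOURCE A (Python) =====
-- def _limit_per_class(video_dirs: list[str], labels: list[int], subset: int) -> tuple[list[str], list[int]]:
--     """Limit prepared video directories to at most ``subset`` items per class."""
--     counts: dict[int, int] = {}
--     limited_dirs: list[str] = []
--     limited_labels: list[int] = []
--     for video_dir, label in zip(video_dirs, labels, strict=True):
--         current = counts.get(label, 0)
--         if current >= subset:
--             continue
--         counts[label] = current + 1
--         limited_dirs.append(video_dir)
--         limited_labels.append(label)
--     return limited_dirs, limited_labels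
-- ===== SOURCE B (Python) =====
-- def _limit_per_class(video_dirs: list[str], labels: list[int], subset: int) -> tuple[list[str], list[int]]:
--     """Limit prepared video directories to at most ``subset`` items per class."""
--     by_label: dict[int, list[int]] = {}
--     for i, (_, label) in enumerate(zip(video_dirs, labels, strict=True)):
--         by_label.setdefault(label, []).append(i)
--     k = max(subset, 0)
--     kept = sorted(i for idxs in by_label.values() for i in idxs[:k])
--     return [video_dirs[i] for i in kept], [labels[i] for i in kept]
-- ===== Notes on version B (the rewrite author's own statement) =====
-- stated objective: alternative
-- what changed: Replaces A's single streaming pass with a per-label counter dict by a staged group-by: build a dict mapping each label to its list of occurrence indices, slice the first max(subset,0) indices of every bucket, sort the collected indices to restore original order, then gather dirs and labels by index.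
import Mathlib
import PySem

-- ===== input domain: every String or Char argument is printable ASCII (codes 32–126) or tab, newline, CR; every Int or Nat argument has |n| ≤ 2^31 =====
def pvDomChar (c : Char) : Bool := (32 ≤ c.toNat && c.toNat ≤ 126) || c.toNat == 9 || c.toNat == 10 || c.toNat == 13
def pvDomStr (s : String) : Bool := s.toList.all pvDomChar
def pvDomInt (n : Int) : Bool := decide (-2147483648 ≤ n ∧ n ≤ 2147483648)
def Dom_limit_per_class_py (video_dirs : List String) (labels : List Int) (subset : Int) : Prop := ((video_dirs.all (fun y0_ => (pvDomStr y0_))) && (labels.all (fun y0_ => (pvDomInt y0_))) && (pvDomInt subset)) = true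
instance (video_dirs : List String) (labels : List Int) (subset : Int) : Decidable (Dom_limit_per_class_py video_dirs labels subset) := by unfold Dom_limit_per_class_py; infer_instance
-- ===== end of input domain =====

-- B replaces A's streaming counter-dict pass by a staged group-by: a per-label index table, per-bucket slices, a sort restoring order, then index gathers (alternative decomposition, not faster).


-- ===== PORT A =====
-- zip(strict=True) raises ValueError on a length mismatch; Pre_ excludes that, so List.zip (which truncates) is exact on Pre_.
def limit_per_class_py (video_dirs : List String) (labels : List Int) (subset : Int) : List String × List Int :=
  let r := (video_dirs.zip labels).foldl
    (fun (st : PySem.Dict Int Int × List String × List Int) (p : String × Int) =>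
      let current := st.1.getD p.2 0
      if current ≥ subset then st
      else (st.1.insert p.2 (current + 1), st.2.1 ++ [p.1], st.2.2 ++ [p.2]))
    (PySem.Dict.empty, [], [])
  r.2

-- ===== PORT B =====
-- zip(strict=True) as in A (Pre_ excludes the mismatch); `setdefault(label, []).append(i)` is exactly
-- `Dict.modify label [] (· ++ [i])`; the slice idxs[:k] with k = max(subset,0) ≥ 0 is `take k.toNat` exactly;
-- sorted(...) of the collected generator is PySem.List.sorted; kept indices are in range, so pyGetD's defaults are never used.
def limit_per_class_py_alt (video_dirs : List String) (labels : List Int) (subset : Int) : List String × List Int :=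
  let by_label := (PySem.List.enumerate (video_dirs.zip labels) 0).foldl
    (fun (d : PySem.Dict Int (List Int)) p => d.modify p.2.2 [] (fun idxs => idxs ++ [p.1]))
    PySem.Dict.empty
  let k := max subset 0
  let kept := PySem.List.sorted (by_label.values.flatMap (fun idxs => idxs.take k.toNat)) (fun i => i) false
  (kept.map (fun i => PySem.List.pyGetD video_dirs i ""), kept.map (fun i => PySem.List.pyGetD labels i 0))

-- ===== PRECONDITION & SPEC =====
-- Pre_ excludes only length-mismatched inputs, on which both Pythons raise ValueError (zip strict=True).
def Pre_limit_per_class_py (video_dirs : List String) (labels : List Int) (subset : Int) : Prop :=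
  video_dirs.length = labels.length
instance (video_dirs : List String) (labels : List Int) (subset : Int) : Decidable (Pre_limit_per_class_py video_dirs labels subset) := by unfold Pre_limit_per_class_py; infer_instance
def pvWitness_limit_per_class_py : List String × List Int × Int := (["a", "b", "c"], [1, 2, 1], 1)

def Spec_limit_per_class_py (video_dirs : List String) (labels : List Int) (subset : Int) (out : List String × List Int) : Prop := out = limit_per_class_py_alt video_dirs labels subset
instance (video_dirs : List String) (labels : List Int) (subset : Int) (out : List String × List Int) : Decidable (Spec_limit_per_class_py video_dirs labels subset out) := by unfold Spec_limit_per_class_py; infer_instance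

-- ===== CLAIM (what is proved, stated in full; the proofs are below) =====
def Claim_equal_limit_per_class_py : Prop := ∀ (video_dirs : List String) (labels : List Int) (subset : Int), Dom_limit_per_class_py video_dirs labels subset → Pre_limit_per_class_py video_dirs labels subset → Spec_limit_per_class_py video_dirs labels subset (limit_per_class_py video_dirs labels subset)

-- ===== LEMMAS AND PROOFS =====

-- The canonical kept-index list: i is kept iff fewer than k earlier positions carry the same label.
def keepIdx (ls : List Int) (k : Nat) : List Nat :=
  (List.range ls.length).filter (fun i => decide ((ls.take i).count (ls.getD i 0) < k))

-- ---- A-side: reference recursion over the zipped pairs.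
def specRec (s : Int) (pre : List Int) : List (String × Int) → List String × List Int
  | [] => ([], [])
  | (d, l) :: rest =>
    let r := specRec s (pre ++ [l]) rest
    if ((pre.count l : Int)) < s then (d :: r.1, l :: r.2) else r

lemma aAux (s : Int) : ∀ (ps : List (String × Int)) (pre : List Int)
    (counts : PySem.Dict Int Int) (ds : List String) (lbs : List Int),
    (∀ l, counts.getD l 0 = min ((pre.count l : Int)) (max s 0)) →
    (ps.foldl
      (fun (st : PySem.Dict Int Int × List String × List Int) (p : String × Int) =>
        let current := st.1.getD p.2 0
        if current ≥ s then st
        else (st.1.insert p.2 (current + 1), st.2.1 ++ [p.1], st.2.2 ++ [p.2]))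
      (counts, ds, lbs)).2
      = (ds ++ (specRec s pre ps).1, lbs ++ (specRec s pre ps).2) := by
  intro ps
  induction ps with
  | nil => intro pre counts ds lbs h; simp [specRec]
  | cons p rest ih =>
    intro pre counts ds lbs h
    obtain ⟨d, l⟩ := p
    have hcur : counts.getD l 0 = min ((pre.count l : Int)) (max s 0) := h l
    by_cases hk : ((pre.count l : Int)) < s
    · have hlt : ¬ counts.getD l 0 ≥ s := by rw [hcur]; omega
      simp only [List.foldl_cons, specRec, hk, if_pos, hcur]
      rw [if_neg (show ¬ min ((pre.count l : Int)) (max s 0) ≥ s by omega)]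
      rw [ih (pre ++ [l]) _ (ds ++ [d]) (lbs ++ [l]) ?_]
      · simp
      · intro l'
        rw [PySem.Dict.getD_insert]
        by_cases he : l' = l
        · subst he
          simp only [hcur, List.count_append, List.count_singleton]
          simp only [beq_self_eq_true, if_pos]
          push_cast
          omega
        · simp only [if_neg he, h l', List.count_append, List.count_singleton]
          have : (l == l') = false := by simp; exact fun hh => he hh.symm
          simp [this]
    · have hge : counts.getD l 0 ≥ s := by rw [hcur]; omega
      simp only [List.foldl_cons, specRec, hk, if_pos hge]
      rw [ih (pre ++ [l]) _ ds lbs ?_]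
      · simp
      · intro l'
        by_cases he : l' = l
        · subst he
          rw [h l']
          simp only [List.count_append, List.count_singleton, beq_self_eq_true, if_pos]
          omega
        · rw [h l']
          simp only [List.count_append, List.count_singleton]
          have : (l == l') = false := by simp; exact fun hh => he hh.symm
          simp [this]

lemma bAux (s : Int) : ∀ (ls : List Int) (vd : List String) (pre : List Int),
    vd.length = ls.length →
    specRec s pre (vd.zip ls) =
      ( ((List.range ls.length).filter
          (fun i => (((pre ++ ls).take (pre.length + i)).count ((pre ++ ls).getD (pre.length + i) 0) : Int) < s)).map
          (fun i => vd.getD i ""),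
        ((List.range ls.length).filter
          (fun i => (((pre ++ ls).take (pre.length + i)).count ((pre ++ ls).getD (pre.length + i) 0) : Int) < s)).map
          (fun i => ls.getD i 0) ) := by
  intro ls
  induction ls with
  | nil =>
    intro vd pre hlen
    have : vd = [] := List.length_eq_zero_iff.mp hlen
    subst this
    simp [specRec]
  | cons l t ih =>
    intro vd pre hlen
    cases vd with
    | nil => simp at hlen
    | cons d vt =>
      have hlen' : vt.length = t.length := by simpa using hlen
      have hcond0 : (pre ++ l :: t).take (pre.length + 0) = pre := by
        simp
      have hget0 : (pre ++ l :: t).getD (pre.length + 0) 0 = l := by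
        simp [List.getD]
      have hshift : ∀ i : Nat,
          ((pre ++ l :: t).take (pre.length + (i + 1)) = ((pre ++ [l]) ++ t).take ((pre ++ [l]).length + i))
          ∧ ((pre ++ l :: t).getD (pre.length + (i + 1)) 0 = ((pre ++ [l]) ++ t).getD ((pre ++ [l]).length + i) 0) := by
        intro i
        constructor
        · simp only [List.append_assoc, List.singleton_append, List.length_append, List.length_singleton]
          ring_nf
        · simp only [List.append_assoc, List.singleton_append, List.length_append, List.length_singleton]
          ring_nf
      rw [List.zip_cons_cons]
      simp only [List.length_cons]
      rw [List.range_succ_eq_map, List.filter_cons]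
      simp only [specRec]
      rw [ih vt (pre ++ [l]) hlen', List.filter_map]
      rw [hcond0, hget0]
      have hfilt : List.filter ((fun i => decide ((((pre ++ l :: t).take (pre.length + i)).count ((pre ++ l :: t).getD (pre.length + i) 0) : Int) < s)) ∘ Nat.succ) (List.range t.length)
          = List.filter (fun i => decide (((((pre ++ [l]) ++ t).take ((pre ++ [l]).length + i)).count (((pre ++ [l]) ++ t).getD ((pre ++ [l]).length + i) 0) : Int) < s)) (List.range t.length) := by
        apply List.filter_congr
        intro i _
        simp only [Function.comp_apply, Nat.succ_eq_add_one]
        rw [(hshift i).1, (hshift i).2]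
      rw [hfilt]
      by_cases hk : ((pre.count l : Int)) < s
      · rw [if_pos hk]
        simp only [hk, decide_true, if_true]
        simp [List.map_map, Function.comp, Prod.ext_iff]
      · rw [if_neg hk]
        simp only [hk, decide_false, Bool.false_eq_true, if_false]
        simp [List.map_map, Function.comp, Prod.ext_iff]

-- The Int-threshold condition A uses agrees with the Nat-threshold condition of keepIdx (k = (max subset 0).toNat).
lemma keepIdx_eq_int_filter (ls : List Int) (subset : Int) :
    (List.range ls.length).filter
      (fun i => decide (((ls.take i).count (ls.getD i 0) : Int) < subset))
      = keepIdx ls (max subset 0).toNat := by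
  unfold keepIdx
  apply List.filter_congr
  intro i _
  rw [decide_eq_decide]
  omega

-- A equals the gathers over keepIdx.
lemma a_eq_keep (vd : List String) (ls : List Int) (subset : Int) (hlen : vd.length = ls.length) :
    limit_per_class_py vd ls subset
      = ((keepIdx ls (max subset 0).toNat).map (fun i => vd.getD i ""),
         (keepIdx ls (max subset 0).toNat).map (fun i => ls.getD i 0)) := by
  simp only [limit_per_class_py]
  have hempty : ∀ l : Int, (PySem.Dict.empty : PySem.Dict Int Int).getD l 0
      = min ((([] : List Int).count l : Int)) (max subset 0) := by
    intro l
    rw [PySem.Dict.getD_empty]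
    simp only [List.count_nil, Nat.cast_zero]
    omega
  have ha := aAux subset (vd.zip ls) [] PySem.Dict.empty [] [] hempty
  have hb := bAux subset ls vd [] hlen
  simp only [List.nil_append] at ha
  simp only [List.nil_append, List.length_nil, Nat.zero_add] at hb
  rw [ha, hb, keepIdx_eq_int_filter]

-- ---- B-side.
lemma enumZip (l : Int) : ∀ (vd : List String) (ls : List Int) (s : Int), vd.length = ls.length →
    ((PySem.List.enumerate (vd.zip ls) s).filter (fun p => p.2.2 == l)).map (·.1)
      = ((PySem.List.enumerate ls s).filter (fun q => q.2 == l)).map (·.1) := by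
  intro vd
  induction vd with
  | nil =>
    intro ls s h
    have : ls = [] := (List.length_eq_zero_iff.mp h.symm)
    subst this; simp [PySem.List.enumerate_nil]
  | cons d vt ih =>
    intro ls s h
    cases ls with
    | nil => simp at h
    | cons a t =>
      have h' : vt.length = t.length := by simpa using h
      rw [List.zip_cons_cons, PySem.List.enumerate_cons, PySem.List.enumerate_cons,
        List.filter_cons, List.filter_cons]
      by_cases hal : a = l
      · simp only [hal, beq_self_eq_true, if_pos, List.map_cons, ih t (s+1) h']
      · have : (a == l) = false := by simp [hal]
        simp only [this, Bool.false_eq_true, if_false, ih t (s+1) h']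

lemma byLabel_getD (vd : List String) (ls : List Int) (hlen : vd.length = ls.length) (l : Int) :
    ((PySem.List.enumerate (vd.zip ls) 0).foldl
        (fun (d : PySem.Dict Int (List Int)) p => d.modify p.2.2 [] (fun idxs => idxs ++ [p.1]))
        PySem.Dict.empty).getD l []
      = ((PySem.List.enumerate ls 0).filter (fun q => q.2 == l)).map (·.1) := by
  have hfold : ((PySem.List.enumerate (vd.zip ls) 0).foldl
        (fun (d : PySem.Dict Int (List Int)) p => d.modify p.2.2 [] (fun idxs => idxs ++ [p.1]))
        PySem.Dict.empty)
      = (((PySem.List.enumerate (vd.zip ls) 0).map (fun p => (p.2.2, p.1))).foldl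
        (fun (d : PySem.Dict Int (List Int)) q => d.modify q.1 [] (fun idxs => idxs ++ [q.2]))
        PySem.Dict.empty) := by
    rw [List.foldl_map]
  rw [hfold, PySem.Dict.getD_foldl_modify_append, PySem.Dict.getD_empty, List.nil_append]
  rw [List.filter_map]
  rw [List.map_map]
  exact enumZip l vd ls 0 hlen

lemma byLabel_keys (vd : List String) (ls : List Int) (hlen : vd.length = ls.length) :
    (((PySem.List.enumerate (vd.zip ls) 0).foldl
        (fun (d : PySem.Dict Int (List Int)) p => d.modify p.2.2 [] (fun idxs => idxs ++ [p.1]))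
        PySem.Dict.empty).keys.Nodup)
    ∧ (∀ x : Int, x ∈ ((PySem.List.enumerate (vd.zip ls) 0).foldl
        (fun (d : PySem.Dict Int (List Int)) p => d.modify p.2.2 [] (fun idxs => idxs ++ [p.1]))
        PySem.Dict.empty).keys ↔ x ∈ ls) := by
  constructor
  · exact PySem.Dict.nodup_keys_foldl_modify_key _ _ _ _ _ PySem.Dict.nodup_keys_empty
  · intro x
    rw [PySem.Dict.keys_foldl_modify_key, PySem.Dict.keys_empty, PySem.Set.update_nil_left,
      PySem.Set.mem_ofList]
    have hmap : (PySem.List.enumerate (vd.zip ls) 0).map (fun p => p.2.2) = ls := by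
      have h1 : (PySem.List.enumerate (vd.zip ls) 0).map (fun p => p.2.2)
          = ((PySem.List.enumerate (vd.zip ls) 0).map (·.2)).map (·.2) := by
        rw [List.map_map]; rfl
      rw [h1, PySem.List.map_snd_enumerate]
      exact List.map_snd_zip (le_of_eq hlen.symm)
    rw [hmap]

lemma bucket (l : Int) (k : Nat) : ∀ (rest pre : List Int),
    (((PySem.List.enumerate rest (pre.length : Int)).filter (fun q => q.2 == l)).map (·.1)).take (k - pre.count l)
      = ((List.range' pre.length rest.length).filter
          (fun i => decide (((pre ++ rest).take i).count ((pre ++ rest).getD i 0) < k)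
                    && decide ((pre ++ rest).getD i 0 = l))).map (fun (i : Nat) => (i : Int)) := by
  intro rest
  induction rest with
  | nil => intro pre; simp [PySem.List.enumerate_nil]
  | cons a t ih =>
    intro pre
    have hget0 : (pre ++ a :: t).getD pre.length 0 = a := by simp [List.getD]
    have htake0 : (pre ++ a :: t).take pre.length = pre := by simp
    have happ : (pre ++ [a]) ++ t = pre ++ a :: t := by simp
    have hlenN : (pre ++ [a]).length = pre.length + 1 := by simp
    have hih := ih (pre ++ [a])
    rw [happ, hlenN] at hih
    rw [show ((pre.length + 1 : Nat) : Int) = (pre.length : Int) + 1 by push_cast; ring] at hih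
    rw [PySem.List.enumerate_cons, List.length_cons, List.range'_succ,
      List.filter_cons, List.filter_cons, hget0, htake0]
    by_cases hal : a = l
    · subst hal
      have hcnt : (pre ++ [a]).count a = pre.count a + 1 := by simp
      rw [hcnt] at hih
      have hcl : (a == a) = true := by simp
      by_cases hk : pre.count a < k
      · have hsucc : k - pre.count a = (k - (pre.count a + 1)) + 1 := by omega
        have hcond : (decide (pre.count a < k) && decide (a = a)) = true := by simp [hk]
        rw [hcl, hcond]
        simp only [if_true, List.map_cons, hsucc, List.take_succ_cons]
        rw [hih]
      · have hz : k - pre.count a = 0 := by omega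
        have hz' : k - (pre.count a + 1) = 0 := by omega
        have hcond : (decide (pre.count a < k) && decide (a = a)) = false := by simp; omega
        rw [hcl, hcond, hz]
        simp only [if_true, Bool.false_eq_true, if_false, List.take_zero]
        rw [hz'] at hih
        simp only [List.take_zero] at hih
        exact hih
    · have hb : (a == l) = false := by simp [hal]
      have hcnt : (pre ++ [a]).count l = pre.count l := by
        simp [List.count_append, hal]
      rw [hcnt] at hih
      have hcond : (decide (pre.count a < k) && decide (a = l)) = false := by
        simp [hal]
      simp only [hb, Bool.false_eq_true, if_false, hcond]
      exact hih

lemma flatMap_filter_perm {α κ : Type} [DecidableEq κ] (f : α → κ) :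
    ∀ (ks : List κ) (xs : List α), ks.Nodup → (∀ x ∈ xs, f x ∈ ks) →
    (ks.flatMap (fun l => xs.filter (fun x => decide (f x = l)))).Perm xs := by
  intro ks
  induction ks with
  | nil =>
    intro xs _ hcov
    have : xs = [] := by
      cases xs with
      | nil => rfl
      | cons a t => exact absurd (hcov a (by simp)) (by simp)
    subst this; simp
  | cons key rest ih =>
    intro xs hnd hcov
    rw [List.nodup_cons] at hnd
    rw [List.flatMap_cons]
    have hcong : ∀ l ∈ rest,
        xs.filter (fun x => decide (f x = l))
          = (xs.filter (fun x => !decide (f x = key))).filter (fun x => decide (f x = l)) := by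
      intro l hl
      rw [List.filter_filter]
      apply List.filter_congr
      intro x _
      by_cases h : f x = l
      · have : f x ≠ key := fun hk => hnd.1 (by rw [← h, hk] at hl; exact hl)
        rw [h] at this
        simp [h, this]
      · simp [h]
    have hmap : rest.flatMap (fun l => xs.filter (fun x => decide (f x = l)))
        = rest.flatMap (fun l => (xs.filter (fun x => !decide (f x = key))).filter (fun x => decide (f x = l))) := by
      apply List.flatMap_congr hcong
    rw [hmap]
    have hperm := ih (xs.filter (fun x => !decide (f x = key))) hnd.2 ?_
    · exact ((List.Perm.append_left _ hperm).trans (List.filter_append_perm _ xs))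
    · intro x hx
      rw [List.mem_filter] at hx
      have := hcov x hx.1
      simp at hx
      rcases List.mem_cons.mp this with h | h
      · exact absurd h hx.2
      · exact h

theorem limit_per_class_py_spec' (vd : List String) (ls : List Int) (subset : Int)
    (hlen : vd.length = ls.length) :
    limit_per_class_py vd ls subset = limit_per_class_py_alt vd ls subset := by
  simp only [limit_per_class_py_alt]
  set K := (max subset 0).toNat with hK
  set keep := keepIdx ls K with hkeep
  have hnodup := (byLabel_keys vd ls hlen).1
  have hmem := (byLabel_keys vd ls hlen).2
  set byLabel := ((PySem.List.enumerate (vd.zip ls) 0).foldl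
      (fun (d : PySem.Dict Int (List Int)) p => d.modify p.2.2 [] (fun idxs => idxs ++ [p.1]))
      PySem.Dict.empty) with hBL
  set ks := byLabel.keys with hks
  -- the flattened slices
  have hvals : byLabel.values = ks.map (fun l => byLabel.getD l []) :=
    PySem.Dict.values_eq_map_keys byLabel hnodup []
  have hbucket : ∀ l : Int, (byLabel.getD l []).take K
      = (keep.filter (fun i => decide (ls.getD i 0 = l))).map (fun (i : Nat) => (i : Int)) := by
    intro l
    rw [byLabel_getD vd ls hlen l]
    have hb := bucket l K ls []
    simp only [List.length_nil, Nat.cast_zero, List.count_nil, Nat.sub_zero, List.nil_append] at hb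
    rw [hb, ← List.range_eq_range']
    have : keep.filter (fun i => decide (ls.getD i 0 = l))
        = (List.range ls.length).filter
            (fun i => decide ((ls.take i).count (ls.getD i 0) < K) && decide (ls.getD i 0 = l)) := by
      rw [hkeep]; unfold keepIdx
      rw [List.filter_filter]
      apply List.filter_congr
      intro x _
      rw [Bool.and_comm]
    rw [this]
    rfl
  have hflat : byLabel.values.flatMap (fun idxs => idxs.take K)
      = (ks.flatMap (fun l => keep.filter (fun i => decide (ls.getD i 0 = l)))).map
          (fun (i : Nat) => (i : Int)) := by
    rw [hvals, List.flatMap_map, List.map_flatMap]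
    apply List.flatMap_congr
    intro l _
    exact hbucket l
  -- permutation and sortedness
  have hcov : ∀ i ∈ keep, ls.getD i 0 ∈ ks := by
    intro i hi
    have hlt : i < ls.length := by
      have : i ∈ List.range ls.length := List.mem_of_mem_filter hi
      exact List.mem_range.mp this
    rw [hmem]
    rw [List.getD_eq_getElem ls 0 hlt]
    exact List.getElem_mem hlt
  have hperm : ((keep.map (fun (i : Nat) => (i : Int)))).Perm
      (byLabel.values.flatMap (fun idxs => idxs.take K)) := by
    rw [hflat]
    exact (List.Perm.map _ (flatMap_filter_perm (fun i => ls.getD i 0) ks keep hnodup hcov)).symm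
  have hpw : (keep.map (fun (i : Nat) => (i : Int))).Pairwise (fun a b => a < b) := by
    rw [List.pairwise_map]
    have : keep.Pairwise (· < ·) := by
      rw [hkeep]; unfold keepIdx
      exact List.pairwise_lt_range.filter _
    exact this.imp (by intro a b h; exact_mod_cast h)
  have hsorted : PySem.List.sorted (byLabel.values.flatMap (fun idxs => idxs.take K)) (fun i => i) false
      = keep.map (fun (i : Nat) => (i : Int)) :=
    PySem.List.sorted_eq_of_perm_of_pairwise_lt _ _ (fun i => i) hperm hpw
  rw [hsorted]
  rw [a_eq_keep vd ls subset hlen, ← hK, ← hkeep]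
  simp only [List.map_map, Function.comp_def, PySem.List.pyGetD_natCast]

-- ===== VERDICT (by name: the statement is the Claim_ definition above) =====
theorem limit_per_class_py_spec : Claim_equal_limit_per_class_py := by
  intro vd ls subset _ hpre
  exact limit_per_class_py_spec' vd ls subset hpre
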